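-- pv_equiv track=rewrite | github.com/raeez/chiral-bar-cobar | compute/lib/mg_w3_genus2_graph_engine.py | half_edge_channels
-- ===== SOURCE A (Python) =====
-- from typing import Dict, List, Optional, Tuple
--
-- GRAPHS = [
--     {
--         'name': 'smooth',
--         'index': 0,
--         'vertex_genera': (2,),
--         'vertex_valences': (0,),
--         'edges': [],
--         'aut': 1,
--         'h1': 0,
--         'description': '1 vertex g=2, no edges. The smooth stratum M_2.',
--     },
--     {
--         'name': 'fig_eight',
--         'index': 1,
--         'vertex_genera': (1,),
--         'vertex_valences': (2,),
--         'edges': [('self', 0)],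
--         'aut': 2,
--         'h1': 1,
--         'description': '1 vertex g=1, 1 self-loop. Irreducible node at genus 1.',
--     },
--     {
--         'name': 'banana',
--         'index': 2,
--         'vertex_genera': (0,),
--         'vertex_valences': (4,),
--         'edges': [('self', 0), ('self', 0)],
--         'aut': 8,
--         'h1': 2,
--         'description': '1 vertex g=0, 2 self-loops. Two nodes on a rational curve.',
--     },
--     {
--         'name': 'dumbbell',
--         'index': 3,
--         'vertex_genera': (1, 1),
--         'vertex_valences': (1, 1),
--         'edges': [('bridge', 0, 1)],
--         'aut': 2,
--         'h1': 0,
--         'description': '2 vertices g=1, 1 bridge. Separating node.',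
--     },
--     {
--         'name': 'theta',
--         'index': 4,
--         'vertex_genera': (0, 0),
--         'vertex_valences': (3, 3),
--         'edges': [('bridge', 0, 1), ('bridge', 0, 1), ('bridge', 0, 1)],
--         'aut': 12,
--         'h1': 2,
--         'description': '2 vertices g=0, 3 bridges. The theta graph.',
--     },
--     {
--         'name': 'lollipop',
--         'index': 5,
--         'vertex_genera': (0, 1),
--         'vertex_valences': (3, 1),
--         'edges': [('self', 0), ('bridge', 0, 1)],
--         'aut': 2,
--         'h1': 1,
--         'description': 'Vertex g=0 with self-loop + bridge to vertex g=1.',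
--     },
--     {
--         'name': 'barbell',
--         'index': 6,
--         'vertex_genera': (0, 0),
--         'vertex_valences': (3, 3),
--         'edges': [('self', 0), ('bridge', 0, 1), ('self', 1)],
--         'aut': 8,
--         'h1': 2,
--         'description': '2 vertices g=0, 1 bridge + 1 self-loop on each vertex. '
--                        '|Aut| = 8 (vertex swap * 2 self-loop flips).',
--     },
-- ]
--
-- def half_edge_channels(graph_idx: int, sigma: Tuple[str, ...]) -> List[List[str]]:
--     """For each vertex, return the list of half-edge channel labels.
--
--     Each bridge (v1,v2) contributes one half-edge to v1 and one to v2.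
--     Each self-loop at v contributes two half-edges (same channel) to v.
--     """
--     G = GRAPHS[graph_idx]
--     n_v = len(G['vertex_genera'])
--     channels = [[] for _ in range(n_v)]
--     for edge_idx, edge in enumerate(G['edges']):
--         ch = sigma[edge_idx]
--         if edge[0] == 'self':
--             v = edge[1]
--             channels[v].append(ch)
--             channels[v].append(ch)
--         else:  # bridge
--             v1, v2 = edge[1], edge[2]
--             channels[v1].append(ch)
--             channels[v2].append(ch)
--     return channels
-- ===== SOURCE B (Python) =====
-- from typing import List, Tuple
--
-- from typing import Dict, List, Optional, Tuple
--
-- GRAPHS = [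
--     {'name': 'smooth', 'index': 0, 'vertex_genera': (2,), 'vertex_valences': (0,), 'edges': [], 'aut': 1, 'h1': 0},
--     {'name': 'fig_eight', 'index': 1, 'vertex_genera': (1,), 'vertex_valences': (2,), 'edges': [('self', 0)], 'aut': 2, 'h1': 1},
--     {'name': 'banana', 'index': 2, 'vertex_genera': (0,), 'vertex_valences': (4,), 'edges': [('self', 0), ('self', 0)], 'aut': 8, 'h1': 2},
--     {'name': 'dumbbell', 'index': 3, 'vertex_genera': (1, 1), 'vertex_valences': (1, 1), 'edges': [('bridge', 0, 1)], 'aut': 2, 'h1': 0},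
--     {'name': 'theta', 'index': 4, 'vertex_genera': (0, 0), 'vertex_valences': (3, 3), 'edges': [('bridge', 0, 1), ('bridge', 0, 1), ('bridge', 0, 1)], 'aut': 12, 'h1': 2},
--     {'name': 'lollipop', 'index': 5, 'vertex_genera': (0, 1), 'vertex_valences': (3, 1), 'edges': [('self', 0), ('bridge', 0, 1)], 'aut': 2, 'h1': 1},
--     {'name': 'barbell', 'index': 6, 'vertex_genera': (0, 0), 'vertex_valences': (3, 3), 'edges': [('self', 0), ('bridge', 0, 1), ('self', 1)], 'aut': 8, 'h1': 2},
-- ]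
--
--
-- def half_edge_channels(graph_idx: int, sigma: Tuple[str, ...]) -> List[List[str]]:
--     """Per-vertex build: for each vertex scan the edge list in order and
--     collect that vertex's half-edge channel labels."""
--     G = GRAPHS[graph_idx]
--     n_v = len(G['vertex_genera'])
--     channels = []
--     for v in range(n_v):
--         bucket = []
--         for edge_idx, edge in enumerate(G['edges']):
--             ch = sigma[edge_idx]
--             if edge[0] == 'self':
--                 if edge[1] == v:
--                     bucket.append(ch)
--                     bucket.append(ch)
--             else:
--                 if edge[1] == v:
--                     bucket.append(ch)
--                 if edge[2] == v:
--                     bucket.append(ch)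
--         channels.append(bucket)
--     return channels
-- ===== Notes on version B (the rewrite author's own statement) =====
-- stated objective: alternative
-- what changed: Replaces the single edge pass that appends into mutable per-vertex buckets with a vertex-by-vertex build: for each vertex index the edge list is scanned in order and that vertex's labels are collected directly, appending once per matching endpoint (twice for a self-loop).
import Mathlib
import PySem

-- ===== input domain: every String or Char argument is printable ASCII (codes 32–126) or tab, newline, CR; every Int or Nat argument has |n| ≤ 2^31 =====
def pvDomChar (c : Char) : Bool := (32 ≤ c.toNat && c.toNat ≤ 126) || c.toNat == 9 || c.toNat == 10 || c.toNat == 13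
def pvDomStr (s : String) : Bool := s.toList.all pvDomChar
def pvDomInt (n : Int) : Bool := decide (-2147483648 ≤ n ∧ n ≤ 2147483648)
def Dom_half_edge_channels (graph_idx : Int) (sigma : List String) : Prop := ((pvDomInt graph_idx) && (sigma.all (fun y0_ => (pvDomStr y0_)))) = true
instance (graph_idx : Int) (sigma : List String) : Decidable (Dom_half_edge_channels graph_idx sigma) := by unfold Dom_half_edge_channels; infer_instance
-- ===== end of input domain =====

-- B rebuilds the channels vertex-by-vertex (outer loop over vertices, inner scan of the edges)
-- instead of A's single edge pass appending into mutable buckets; same cost class, alternative decomposition.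

-- ===== PORT A =====
-- The GRAPHS table, restricted to the two fields half_edge_channels reads:
-- (number of vertices = len(vertex_genera), edges). An edge ('self', v) is stored as
-- ("self", v, v) (A only reads component 1 of a self edge); ('bridge', v1, v2) as ("bridge", v1, v2).
def pvGRAPHS : List (Nat × List (String × Int × Int)) :=
  [ (1, []),
    (1, [("self", 0, 0)]),
    (1, [("self", 0, 0), ("self", 0, 0)]),
    (2, [("bridge", 0, 1)]),
    (2, [("bridge", 0, 1), ("bridge", 0, 1), ("bridge", 0, 1)]),
    (2, [("self", 0, 0), ("bridge", 0, 1)]),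
    (2, [("self", 0, 0), ("bridge", 0, 1), ("self", 1, 1)]) ]

-- channels[v].append(ch)  (v is a vertex index of the fixed table, always 0 ≤ v < n_v)
def pvAppendAt (chs : List (List String)) (v : Int) (ch : String) : List (List String) :=
  chs.set v.toNat (chs.getD v.toNat [] ++ [ch])

def half_edge_channels (graph_idx : Int) (sigma : List String) : List (List String) :=
  match PySem.List.pyGet? pvGRAPHS graph_idx with
  | none => []          -- Python raises IndexError here; excluded by Pre_
  | some G =>
    let n_v := G.1
    let init : List (List String) := List.replicate n_v []
    (PySem.List.enumerate G.2).foldl (fun channels p =>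
      match PySem.List.pyGet? sigma p.1 with
      | none => channels          -- Python raises IndexError here; excluded by Pre_
      | some ch =>
        if p.2.1 == "self" then
          pvAppendAt (pvAppendAt channels p.2.2.1 ch) p.2.2.1 ch
        else
          pvAppendAt (pvAppendAt channels p.2.2.1 ch) p.2.2.2 ch) init

-- ===== PORT B =====
def half_edge_channels_alt (graph_idx : Int) (sigma : List String) : List (List String) :=
  match PySem.List.pyGet? pvGRAPHS graph_idx with
  | none => []          -- Python raises IndexError here; excluded by Pre_
  | some G =>
    (List.range G.1).map (fun v =>
      (PySem.List.enumerate G.2).foldl (fun bucket p =>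
        match PySem.List.pyGet? sigma p.1 with
        | none => bucket          -- Python raises IndexError here; excluded by Pre_
        | some ch =>
          if p.2.1 == "self" then
            (if p.2.2.1 == (v : Int) then bucket ++ [ch, ch] else bucket)
          else
            (if p.2.2.1 == (v : Int) then bucket ++ [ch] else bucket) ++
              (if p.2.2.2 == (v : Int) then [ch] else [])) [])

-- ===== PRECONDITION & SPEC =====
-- Pre_: graph_idx is a valid (possibly negative, Python-style) index into the 7-entry GRAPHS
-- table, and sigma has at least as many labels as that graph has edges (edge counts by index
-- 0..6: 0,1,2,1,3,2,3); otherwise A raises IndexError.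
def Pre_half_edge_channels (graph_idx : Int) (sigma : List String) : Prop :=
  -7 ≤ graph_idx ∧ graph_idx < 7 ∧
    ([0, 1, 2, 1, 3, 2, 3].getD (graph_idx % 7).toNat 0 : Nat) ≤ sigma.length
instance (graph_idx : Int) (sigma : List String) : Decidable (Pre_half_edge_channels graph_idx sigma) := by unfold Pre_half_edge_channels; infer_instance

def pvWitness_half_edge_channels : Int × List String := (6, ["a", "b", "c"])

def Spec_half_edge_channels (graph_idx : Int) (sigma : List String) (out : List (List String)) : Prop := out = half_edge_channels_alt graph_idx sigma
instance (graph_idx : Int) (sigma : List String) (out : List (List String)) : Decidable (Spec_half_edge_channels graph_idx sigma out) := by unfold Spec_half_edge_channels; infer_instance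

-- ===== CLAIM (what is proved, stated in full; the proofs are below) =====
def Claim_equal_half_edge_channels : Prop := ∀ (graph_idx : Int) (sigma : List String), Dom_half_edge_channels graph_idx sigma → Pre_half_edge_channels graph_idx sigma → Spec_half_edge_channels graph_idx sigma (half_edge_channels graph_idx sigma)

-- ===== LEMMAS AND PROOFS =====

-- Closed-form values of the GRAPHS table lookup, one per admitted graph_idx (negative = Python wraparound).
theorem pvG_m6 : PySem.List.pyGet? pvGRAPHS (-6) = some (1, [("self", 0, 0)]) := by decide
theorem pvG_m5 : PySem.List.pyGet? pvGRAPHS (-5) = some (1, [("self", 0, 0), ("self", 0, 0)]) := by decide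
theorem pvG_m4 : PySem.List.pyGet? pvGRAPHS (-4) = some (2, [("bridge", 0, 1)]) := by decide
theorem pvG_m3 : PySem.List.pyGet? pvGRAPHS (-3) = some (2, [("bridge", 0, 1), ("bridge", 0, 1), ("bridge", 0, 1)]) := by decide
theorem pvG_m2 : PySem.List.pyGet? pvGRAPHS (-2) = some (2, [("self", 0, 0), ("bridge", 0, 1)]) := by decide
theorem pvG_m1 : PySem.List.pyGet? pvGRAPHS (-1) = some (2, [("self", 0, 0), ("bridge", 0, 1), ("self", 1, 1)]) := by decide
theorem pvG_1 : PySem.List.pyGet? pvGRAPHS 1 = some (1, [("self", 0, 0)]) := by decide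
theorem pvG_2 : PySem.List.pyGet? pvGRAPHS 2 = some (1, [("self", 0, 0), ("self", 0, 0)]) := by decide
theorem pvG_3 : PySem.List.pyGet? pvGRAPHS 3 = some (2, [("bridge", 0, 1)]) := by decide
theorem pvG_4 : PySem.List.pyGet? pvGRAPHS 4 = some (2, [("bridge", 0, 1), ("bridge", 0, 1), ("bridge", 0, 1)]) := by decide
theorem pvG_5 : PySem.List.pyGet? pvGRAPHS 5 = some (2, [("self", 0, 0), ("bridge", 0, 1)]) := by decide
theorem pvG_6 : PySem.List.pyGet? pvGRAPHS 6 = some (2, [("self", 0, 0), ("bridge", 0, 1), ("self", 1, 1)]) := by decide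

-- ===== VERDICT (by name: the statement is the Claim_ definition above) =====
set_option maxHeartbeats 2000000 in
theorem half_edge_channels_spec : Claim_equal_half_edge_channels := by
  intro g sigma _ hpre
  obtain ⟨h1, h2, -⟩ := hpre
  unfold Spec_half_edge_channels
  interval_cases g <;>
    rcases sigma with _ | ⟨a, _ | ⟨b, _ | ⟨c, rest⟩⟩⟩ <;>
    first
      | rfl
      | (have e0 : PySem.List.pyGet? (a :: b :: c :: rest) (0 : Int) = some a := by simp [pysem]
         have e1 : PySem.List.pyGet? (a :: b :: c :: rest) (1 : Int) = some b := by simp [pysem]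
         have e2 : PySem.List.pyGet? (a :: b :: c :: rest) (2 : Int) = some c := by simp [pysem]
         simp only [half_edge_channels, half_edge_channels_alt, pvG_m6, pvG_m5, pvG_m4,
           pvG_m3, pvG_m2, pvG_m1, pvG_1, pvG_2, pvG_3, pvG_4, pvG_5, pvG_6,
           PySem.List.enumerate_cons, PySem.List.enumerate_nil, List.foldl_cons, List.foldl_nil]
         norm_num [e0, e1, e2, pvAppendAt]
         try simp [List.replicate, List.range_succ, show ("bridge" : String) ≠ "self" from by decide])
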